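-- pv_equiv track=rewrite | github.com/martinhova01/everybody-codes | 25/05/main.py | build_sword
-- ===== SOURCE A (Python) =====
-- def build_sword(nums):
--     sword = []
--     for num in nums:
--         placed = False
--         for i in range(len(sword)):
--             left, mid, right = sword[i]
--             if num < mid and not left:
--                 sword[i][0] = num
--                 placed = True
--                 break
--             if num > mid and not right:
--                 sword[i][2] = num
--                 placed = True
--                 break
--
--         if not placed:
--             sword.append([None, num, None])
--     return sword
-- ===== SOURCE B (Python) =====
-- def build_sword(nums):
--     n = len(nums)
--     size = 1
--     while size < n:
--         size *= 2
--     t = _vacant(size)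
--     rows = []
--     for num in nums:
--         hit = _query(t, num, 0, size)
--         if hit is None:
--             i = len(rows)
--             rows.append([None, num, None])
--             t = _set(t, i, (num, num), 0, size)
--         else:
--             i, is_left = hit
--             row = rows[i]
--             row[0 if is_left else 2] = num
--             t = _set(t, i, _leafvals(row), 0, size)
--     return rows
--
--
-- def _leafvals(row):
--     left, mid, right = row
--     return (mid if not left else None, mid if not right else None)
--
--
-- def _omax(a, b):
--     return b if a is None else a if b is None else max(a, b)
--
--
-- def _omin(a, b):
--     return b if a is None else a if b is None else min(a, b)
--
--
-- def _vacant(size):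
--     # node = (maxMidWithEmptyLeft, minMidWithEmptyRight, leftChild, rightChild)
--     if size <= 1:
--         return (None, None, None, None)
--     c = _vacant(size // 2)
--     return (None, None, c, c)
--
--
-- def _query(t, num, base, size):
--     mxL, mnR, l, r = t
--     if not ((mxL is not None and num < mxL) or (mnR is not None and num > mnR)):
--         return None
--     if size <= 1:
--         if mxL is not None and num < mxL:
--             return (base, True)
--         return (base, False)
--     res = _query(l, num, base, size // 2)
--     if res is not None:
--         return res
--     return _query(r, num, base + size // 2, size // 2)
--
--
-- def _set(t, i, vals, base, size):
--     if size <= 1: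
--         return (vals[0], vals[1], None, None)
--     _, _, l, r = t
--     h = size // 2
--     if i < base + h:
--         l = _set(l, i, vals, base, h)
--     else:
--         r = _set(r, i, vals, base + h, h)
--     return (_omax(l[0], r[0]), _omin(l[1], r[1]), l, r)
-- ===== Notes on version B (the rewrite author's own statement) =====
-- stated objective: faster
-- what changed: B replaces A's linear first-fit scan over rows with a persistent segment tree over row indices storing, per segment, the max mid among rows with an empty left slot and the min mid among rows with an empty right slot, so the leftmost qualifying row is found by a single O(log n) tree descent.
import Mathlib
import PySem

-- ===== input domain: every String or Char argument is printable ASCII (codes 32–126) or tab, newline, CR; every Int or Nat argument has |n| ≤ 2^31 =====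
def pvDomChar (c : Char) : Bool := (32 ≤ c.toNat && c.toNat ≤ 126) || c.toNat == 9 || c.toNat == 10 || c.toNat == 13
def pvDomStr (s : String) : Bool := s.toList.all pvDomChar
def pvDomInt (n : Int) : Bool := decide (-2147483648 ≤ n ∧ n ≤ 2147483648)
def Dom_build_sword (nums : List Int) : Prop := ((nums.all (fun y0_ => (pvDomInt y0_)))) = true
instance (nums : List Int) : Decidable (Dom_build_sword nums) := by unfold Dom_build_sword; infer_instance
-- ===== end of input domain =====

-- B replaces A's O(n^2) linear first-fit scan by a persistent segment tree over row
-- indices (max empty-left mid / min empty-right mid per segment), O(n log n); the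
-- Python timing run measured B markedly faster. A mutates its row lists in place;
-- the equivalence proved here is about the return value.

-- ===== PORT A =====
-- Python truthiness of a slot value: None and 0 are falsy (`not left`)
def pyFalsy (o : Option Int) : Bool := o.getD 0 == 0

-- `num < mid` / `num > mid` where mid came out of the row list; in A mid is always an int
def pyLtO (num : Int) (mid : Option Int) : Bool :=
  match mid with | some m => decide (num < m) | none => false
def pyGtO (num : Int) (mid : Option Int) : Bool :=
  match mid with | some m => decide (m < num) | none => false

-- A's inner `for i in range(len(sword))` with break, mutating sword[i][0] / sword[i][2]
def aFind (num : Int) (sword : List (List (Option Int))) (i : Nat) :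
    List (List (Option Int)) × Bool :=
  if _h : i < sword.length then
    let row := sword.getD i []
    let left := row.getD 0 none
    let mid := row.getD 1 none
    let right := row.getD 2 none
    if pyLtO num mid && pyFalsy left then (sword.set i (row.set 0 (some num)), true)
    else if pyGtO num mid && pyFalsy right then (sword.set i (row.set 2 (some num)), true)
    else aFind num sword (i + 1)
  else (sword, false)
  termination_by sword.length - i

def build_sword (nums : List Int) : List (List (Option Int)) :=
  nums.foldl (fun sword num =>
    let r := aFind num sword 0
    if r.2 then r.1 else sword ++ [[none, some num, none]]) []

-- ===== PORT B =====
-- segment-tree node: Python's tuple (mxL, mnR, leftChild, rightChild); leaf = (mxL, mnR, None, None)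
inductive STree where
  | leaf (mxL mnR : Option Int) : STree
  | node (mxL mnR : Option Int) (l r : STree) : STree
deriving DecidableEq, Repr

def sMx : STree → Option Int
  | .leaf a _ => a
  | .node a _ _ _ => a
def sMn : STree → Option Int
  | .leaf _ b => b
  | .node _ b _ _ => b

-- Python's `_omax` / `_omin` (None = identity)
def omax (a b : Option Int) : Option Int :=
  match a with | none => b | some x => match b with | none => some x | some y => some (max x y)
def omin (a b : Option Int) : Option Int :=
  match a with | none => b | some x => match b with | none => some x | some y => some (min x y)

-- `mxL is not None and num < mxL` / `mnR is not None and num > mnR`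
def oLt (num : Int) (a : Option Int) : Bool :=
  match a with | some m => decide (num < m) | none => false
def oGt (num : Int) (b : Option Int) : Bool :=
  match b with | some m => decide (m < num) | none => false

-- Python's `_vacant`
def vacant (size : Nat) : STree :=
  if _h : size ≤ 1 then .leaf none none
  else
    let c := vacant (size / 2)
    .node none none c c
  termination_by size

-- Python's `_leafvals(row)`
def leafvals (row : List (Option Int)) : Option Int × Option Int :=
  (if pyFalsy (row.getD 0 none) then row.getD 1 none else none,
   if pyFalsy (row.getD 2 none) then row.getD 1 none else none)

-- Python's `_query`
def queryT (t : STree) (num : Int) (base size : Nat) : Option (Nat × Bool) :=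
  match t with
  | .leaf mxL mnR =>
    if !(oLt num mxL || oGt num mnR) then none
    else if oLt num mxL then some (base, true) else some (base, false)
  | .node mxL mnR l r =>
    if !(oLt num mxL || oGt num mnR) then none
    else
      match queryT l num base (size / 2) with
      | some res => some res
      | none => queryT r num (base + size / 2) (size / 2)

-- Python's `_set`
def setT (t : STree) (i : Nat) (vals : Option Int × Option Int) (base size : Nat) : STree :=
  match t with
  | .leaf _ _ => .leaf vals.1 vals.2
  | .node _ _ l r =>
    let h := size / 2
    if i < base + h then
      let l' := setT l i vals base h
      .node (omax (sMx l') (sMx r)) (omin (sMn l') (sMn r)) l' r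
    else
      let r' := setT r i vals (base + h) h
      .node (omax (sMx l) (sMx r')) (omin (sMn l) (sMn r')) l r'

-- Python's `while size < n: size *= 2` (the `0 < size` conjunct only makes the loop total; it always holds)
def grow (size n : Nat) : Nat :=
  if size < n ∧ 0 < size then grow (size * 2) n else size
  termination_by n - size

-- one iteration of B's main loop
def bStep (size : Nat) (st : List (List (Option Int)) × STree) (num : Int) :
    List (List (Option Int)) × STree :=
  match queryT st.2 num 0 size with
  | none =>
    (st.1 ++ [[none, some num, none]], setT st.2 st.1.length (some num, some num) 0 size)
  | some (i, isLeft) =>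
    let row := st.1.getD i []
    let row' := row.set (if isLeft then 0 else 2) (some num)
    (st.1.set i row', setT st.2 i (leafvals row') 0 size)

def build_sword_alt (nums : List Int) : List (List (Option Int)) :=
  let size := grow 1 nums.length
  (nums.foldl (bStep size) ([], vacant size)).1

-- ===== PRECONDITION & SPEC =====
def Spec_build_sword (nums : List Int) (out : List (List (Option Int))) : Prop := out = build_sword_alt nums
instance (nums : List Int) (out : List (List (Option Int))) : Decidable (Spec_build_sword nums out) := by unfold Spec_build_sword; infer_instance

-- ===== CLAIM (what is proved, stated in full; the proofs are below) =====
def Claim_equal_build_sword : Prop := ∀ (nums : List Int), Dom_build_sword nums → Spec_build_sword nums (build_sword nums)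

-- ===== LEMMAS AND PROOFS =====

-- the leaf summaries of a tree, left to right
def leavesT : STree → List (Option Int × Option Int)
  | .leaf a b => [(a, b)]
  | .node _ _ l r => leavesT l ++ leavesT r

-- a leaf summary "qualifies" for num
def qual (num : Int) (p : Option Int × Option Int) : Bool := oLt num p.1 || oGt num p.2

-- reference linear first-fit search over leaf summaries
def lsearch (num : Int) (ls : List (Option Int × Option Int)) (base : Nat) :
    Option (Nat × Bool) :=
  match ls with
  | [] => none
  | p :: t =>
    if oLt num p.1 then some (base, true)
    else if oGt num p.2 then some (base, false)
    else lsearch num t (base + 1)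

def aggL (ls : List (Option Int × Option Int)) : Option Int :=
  ls.foldr (fun p acc => omax p.1 acc) none
def aggR (ls : List (Option Int × Option Int)) : Option Int :=
  ls.foldr (fun p acc => omin p.2 acc) none

-- summaries are correct aggregates of the children
def ValidT : STree → Prop
  | .leaf _ _ => True
  | .node a b l r => ValidT l ∧ ValidT r ∧ a = omax (sMx l) (sMx r) ∧ b = omin (sMn l) (sMn r)

-- a perfect tree with `s` leaves
def SizedT : STree → Nat → Prop
  | .leaf _ _, s => s = 1
  | .node _ _ l r, s => SizedT l (s / 2) ∧ SizedT r (s / 2) ∧ s / 2 + s / 2 = s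

theorem sized_length : ∀ (t : STree) (s : Nat), SizedT t s → (leavesT t).length = s := by
  intro t
  induction t with
  | leaf a b => intro s hs; simpa [leavesT] using hs.symm
  | node a b l r ihl ihr =>
    intro s hs
    obtain ⟨h1, h2, h3⟩ := hs
    simp [leavesT, ihl _ h1, ihr _ h2, h3]

theorem omax_none_right (a : Option Int) : omax a none = a := by cases a <;> simp [omax]
theorem omin_none_right (a : Option Int) : omin a none = a := by cases a <;> simp [omin]

theorem oLt_omax (num : Int) (a b : Option Int) :
    oLt num (omax a b) = (oLt num a || oLt num b) := by
  cases a <;> cases b <;> simp [oLt, omax]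
theorem oGt_omin (num : Int) (a b : Option Int) :
    oGt num (omin a b) = (oGt num a || oGt num b) := by
  cases b <;> cases a <;> simp [oGt, omin]

theorem omax_assoc (a b c : Option Int) : omax a (omax b c) = omax (omax a b) c := by
  cases a <;> cases b <;> cases c <;> simp [omax, max_assoc]
theorem omin_assoc (a b c : Option Int) : omin a (omin b c) = omin (omin a b) c := by
  cases a <;> cases b <;> cases c <;> simp [omin, min_assoc]

theorem aggL_append (xs ys : List (Option Int × Option Int)) :
    aggL (xs ++ ys) = omax (aggL xs) (aggL ys) := by
  induction xs with
  | nil => simp [aggL, omax]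
  | cons p t ih =>
    simp only [aggL, List.foldr_cons, List.cons_append] at *
    rw [ih, omax_assoc]

theorem aggR_append (xs ys : List (Option Int × Option Int)) :
    aggR (xs ++ ys) = omin (aggR xs) (aggR ys) := by
  induction xs with
  | nil => simp [aggR, omin]
  | cons p t ih =>
    simp only [aggR, List.foldr_cons, List.cons_append] at *
    rw [ih, omin_assoc]

theorem valid_agg : ∀ (t : STree), ValidT t → sMx t = aggL (leavesT t) ∧ sMn t = aggR (leavesT t) := by
  intro t
  induction t with
  | leaf a b => intro _; simp [sMx, sMn, leavesT, aggL, aggR, omax_none_right, omin_none_right]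
  | node a b l r ihl ihr =>
    intro hv
    obtain ⟨hl, hr, ha, hb⟩ := hv
    obtain ⟨hl1, hl2⟩ := ihl hl
    obtain ⟨hr1, hr2⟩ := ihr hr
    constructor
    · show a = aggL (leavesT l ++ leavesT r)
      rw [aggL_append, ha, hl1, hr1]
    · show b = aggR (leavesT l ++ leavesT r)
      rw [aggR_append, hb, hl2, hr2]

theorem oLt_aggL (num : Int) (ls : List (Option Int × Option Int)) :
    oLt num (aggL ls) = ls.any (fun p => oLt num p.1) := by
  induction ls with
  | nil => simp [aggL, oLt]
  | cons p t ih => simp only [aggL, List.foldr_cons, List.any_cons] at *; rw [oLt_omax, ih]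

theorem oGt_aggR (num : Int) (ls : List (Option Int × Option Int)) :
    oGt num (aggR ls) = ls.any (fun p => oGt num p.2) := by
  induction ls with
  | nil => simp [aggR, oGt]
  | cons p t ih => simp only [aggR, List.foldr_cons, List.any_cons] at *; rw [oGt_omin, ih]

theorem lsearch_none_of_no_qual (num : Int) (ls : List (Option Int × Option Int)) :
    ∀ (base : Nat), (∀ p ∈ ls, qual num p = false) → lsearch num ls base = none := by
  induction ls with
  | nil => intro base h; simp [lsearch]
  | cons p t ih =>
    intro base h
    have hp := h p (by simp)
    simp only [qual, Bool.or_eq_false_iff] at hp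
    simp only [lsearch, hp.1, hp.2, Bool.false_eq_true, if_false]
    exact ih (base + 1) (fun q hq => h q (by simp [hq]))

theorem lsearch_append (num : Int) (xs ys : List (Option Int × Option Int)) (base : Nat) :
    lsearch num (xs ++ ys) base =
      match lsearch num xs base with
      | some res => some res
      | none => lsearch num ys (base + xs.length) := by
  induction xs generalizing base with
  | nil => simp [lsearch]
  | cons p t ih =>
    simp only [List.cons_append, lsearch]
    split_ifs with h1 h2
    · rfl
    · rfl
    · rw [ih (base + 1)]
      simp only [List.length_cons]
      cases lsearch num t (base + 1) <;> simp <;> ring_nf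

theorem lsearch_range (num : Int) :
    ∀ (ls : List (Option Int × Option Int)) (base j : Nat) (b : Bool),
      lsearch num ls base = some (j, b) → base ≤ j ∧ j < base + ls.length := by
  intro ls
  induction ls with
  | nil => intro base j b h; simp [lsearch] at h
  | cons p t ih =>
    intro base j b h
    rw [lsearch] at h
    split_ifs at h with h1 h2
    · simp only [Option.some.injEq, Prod.mk.injEq] at h
      obtain ⟨rfl, -⟩ := h
      simp only [List.length_cons]; omega
    · simp only [Option.some.injEq, Prod.mk.injEq] at h
      obtain ⟨rfl, -⟩ := h
      simp only [List.length_cons]; omega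
    · have := ih (base + 1) j b h
      simp only [List.length_cons]; omega

-- the segment-tree descent computes exactly the linear first-fit search
theorem query_eq_lsearch (num : Int) :
    ∀ (t : STree) (s base : Nat), ValidT t → SizedT t s →
      queryT t num base s = lsearch num (leavesT t) base := by
  intro t
  induction t with
  | leaf a b =>
    intro s base _ _
    simp only [queryT, leavesT, lsearch]
    by_cases h1 : oLt num a <;> by_cases h2 : oGt num b <;> simp [h1, h2]
  | node a b l r ihl ihr =>
    intro s base hv hs
    obtain ⟨hvl, hvr, ha, hb⟩ := hv
    obtain ⟨hsl, hsr, hhalf⟩ := hs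
    have hor4 : ∀ (x y X Y : Bool), ((x || X) || (y || Y)) = ((x || y) || (X || Y)) := by
      intro x y X Y; cases x <;> cases y <;> cases X <;> cases Y <;> rfl
    have hany : ∀ (ls : List (Option Int × Option Int)),
        (ls.any (fun p => oLt num p.1) || ls.any (fun p => oGt num p.2))
          = ls.any (fun p => qual num p) := by
      intro ls
      induction ls with
      | nil => simp
      | cons p t ih =>
        simp only [List.any_cons]
        rw [hor4, ih]
        simp [qual]
    have hguard : (oLt num a || oGt num b) =
        (leavesT l ++ leavesT r).any (fun p => qual num p) := by
      rw [ha, hb, (valid_agg l hvl).1, (valid_agg l hvl).2,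
          (valid_agg r hvr).1, (valid_agg r hvr).2,
          ← aggL_append, ← aggR_append, oLt_aggL, oGt_aggR, hany]
    rw [queryT]
    by_cases hg : (oLt num a || oGt num b) = true
    · rw [if_neg (by simp [hg])]
      rw [ihl _ base hvl hsl, ihr _ (base + s / 2) hvr hsr]
      rw [leavesT, lsearch_append, sized_length l _ hsl]
    · rw [if_pos (by simp at hg ⊢; exact hg)]
      have : ∀ p ∈ leavesT l ++ leavesT r, qual num p = false := by
        intro p hp
        by_contra hq
        have : (leavesT l ++ leavesT r).any (fun p => qual num p) = true :=
          List.any_eq_true.mpr ⟨p, hp, by simpa using hq⟩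
        rw [← hguard] at this; exact hg this
      rw [leavesT, lsearch_none_of_no_qual num _ base this]

-- set within a list prefix / at the seam
theorem set_append_left {α : Type} (xs ys : List α) (j : Nat) (v : α) (h : j < xs.length) :
    (xs ++ ys).set j v = xs.set j v ++ ys := by
  rw [List.set_append, if_pos h]

theorem set_append_seam {α : Type} (xs : List α) (y : α) (ys : List α) (v : α) :
    (xs ++ y :: ys).set xs.length v = xs ++ v :: ys := by
  induction xs with
  | nil => simp
  | cons x t ih => simp [ih]

-- setT: leaves are pointwise-set, shape and validity preserved
theorem setT_spec (v : Option Int × Option Int) :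
    ∀ (t : STree) (s base i : Nat), SizedT t s → base ≤ i → i < base + s →
      leavesT (setT t i v base s) = (leavesT t).set (i - base) v ∧
      SizedT (setT t i v base s) s ∧
      (ValidT t → ValidT (setT t i v base s)) := by
  intro t
  induction t with
  | leaf a b =>
    intro s base i hs hb hi
    have hs1 : s = 1 := hs
    have : i = base := by omega
    subst this
    refine ⟨?_, hs, fun _ => trivial⟩
    simp [setT, leavesT]
  | node a b l r ihl ihr =>
    intro s base i hs hb hi
    obtain ⟨hsl, hsr, hhalf⟩ := hs
    have hlen_l := sized_length l _ hsl
    have hlen_r := sized_length r _ hsr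
    by_cases hcase : i < base + s / 2
    · have hred : setT (.node a b l r) i v base s =
          .node (omax (sMx (setT l i v base (s / 2))) (sMx r))
                (omin (sMn (setT l i v base (s / 2))) (sMn r))
                (setT l i v base (s / 2)) r := by
        simp only [setT]; rw [if_pos hcase]
      obtain ⟨h1, h2, h3⟩ := ihl (s / 2) base i hsl hb hcase
      rw [hred]
      refine ⟨?_, ⟨h2, hsr, hhalf⟩, ?_⟩
      · show leavesT (setT l i v base (s / 2)) ++ leavesT r = _
        rw [h1]
        simp only [leavesT]
        rw [List.set_append, if_pos (by omega)]
      · intro hv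
        obtain ⟨hvl, hvr, -, -⟩ := hv
        exact ⟨h3 hvl, hvr, rfl, rfl⟩
    · have hb' : base + s / 2 ≤ i := by omega
      have hred : setT (.node a b l r) i v base s =
          .node (omax (sMx l) (sMx (setT r i v (base + s / 2) (s / 2))))
                (omin (sMn l) (sMn (setT r i v (base + s / 2) (s / 2))))
                l (setT r i v (base + s / 2) (s / 2)) := by
        simp only [setT]; rw [if_neg hcase]
      obtain ⟨h1, h2, h3⟩ := ihr (s / 2) (base + s / 2) i hsr hb' (by omega)
      rw [hred]
      refine ⟨?_, ⟨hsl, h2, hhalf⟩, ?_⟩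
      · show leavesT l ++ leavesT (setT r i v (base + s / 2) (s / 2)) = _
        rw [h1]
        simp only [leavesT]
        rw [List.set_append, if_neg (by omega)]
        have hidx : i - base - (leavesT l).length = i - (base + s / 2) := by omega
        rw [hidx]
      · intro hv
        obtain ⟨hvl, hvr, -, -⟩ := hv
        exact ⟨hvl, h3 hvr, rfl, rfl⟩

-- vacant trees over a power of two
theorem vacant_sized : ∀ (k : Nat), SizedT (vacant (2 ^ k)) (2 ^ k) := by
  intro k
  induction k with
  | zero => rw [vacant]; simp [SizedT]
  | succ k ih =>
    rw [vacant]
    have h2 : ¬ 2 ^ (k + 1) ≤ 1 := by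
      have : 2 ≤ 2 ^ (k + 1) := by
        calc 2 = 2 ^ 1 := rfl
        _ ≤ 2 ^ (k + 1) := Nat.pow_le_pow_right (by omega) (by omega)
      omega
    rw [dif_neg h2]
    have hh : 2 ^ (k + 1) / 2 = 2 ^ k := by
      rw [pow_succ]; omega
    refine ⟨by rw [hh]; exact ih, by rw [hh]; exact ih, by rw [hh, pow_succ]; omega⟩

theorem vacant_sMx_sMn (s : Nat) : sMx (vacant s) = none ∧ sMn (vacant s) = none := by
  rw [vacant]
  split_ifs <;> simp [sMx, sMn]

theorem vacant_valid : ∀ (s : Nat), ValidT (vacant s) := by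
  intro s
  induction s using Nat.strong_induction_on with
  | _ s ih =>
    rw [vacant]
    split_ifs with h
    · trivial
    · have hv := ih (s / 2) (by omega)
      exact ⟨hv, hv, by simp [(vacant_sMx_sMn (s / 2)).1, omax],
             by simp [(vacant_sMx_sMn (s / 2)).2, omin]⟩

theorem vacant_leaves : ∀ (k : Nat), leavesT (vacant (2 ^ k)) = List.replicate (2 ^ k) (none, none) := by
  intro k
  induction k with
  | zero => rw [vacant]; simp [leavesT, List.replicate]
  | succ k ih =>
    rw [vacant]
    have h2 : ¬ 2 ^ (k + 1) ≤ 1 := by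
      have : 2 ≤ 2 ^ (k + 1) := by
        calc 2 = 2 ^ 1 := rfl
        _ ≤ 2 ^ (k + 1) := Nat.pow_le_pow_right (by omega) (by omega)
      omega
    rw [dif_neg h2]
    have hh : 2 ^ (k + 1) / 2 = 2 ^ k := by rw [pow_succ]; omega
    simp only [leavesT, hh, ih]
    rw [← List.replicate_add]
    congr 1
    rw [pow_succ]; omega

theorem grow_pow2 : ∀ (s n : Nat), (∃ k, s = 2 ^ k) → ∃ k, grow s n = 2 ^ k := by
  intro s n
  induction s using grow.induct (n := n) with
  | case1 s hlt ih =>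
    intro hp
    obtain ⟨k, hk⟩ := hp
    rw [grow, if_pos hlt]
    exact ih ⟨k + 1, by rw [hk, pow_succ]⟩
  | case2 s hlt =>
    intro hp
    rw [grow, if_neg hlt]
    exact hp

theorem grow_ge : ∀ (s n : Nat), 0 < s → n ≤ grow s n := by
  intro s n
  induction s using grow.induct (n := n) with
  | case1 s hlt ih =>
    intro _
    rw [grow, if_pos hlt]
    exact ih (by omega)
  | case2 s hlt =>
    intro hs
    rw [grow, if_neg hlt]
    omega

-- lsearch skips vacant padding
theorem lsearch_replicate (num : Int) (k base : Nat) :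
    lsearch num (List.replicate k ((none : Option Int), (none : Option Int))) base = none := by
  apply lsearch_none_of_no_qual
  intro p hp
  rw [List.eq_of_mem_replicate hp]
  simp [qual, oLt, oGt]

-- leafvals vs A's conditions
theorem leafvals_lt (num : Int) (row : List (Option Int)) :
    oLt num (leafvals row).1 = (pyLtO num (row.getD 1 none) && pyFalsy (row.getD 0 none)) := by
  simp only [leafvals]
  by_cases h : pyFalsy (row.getD 0 none) = true
  · rw [if_pos h, h, Bool.and_true]
    cases row.getD 1 none <;> rfl
  · have h' : pyFalsy (row.getD 0 none) = false := by simpa using h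
    rw [if_neg h, h', Bool.and_false]
    rfl

theorem leafvals_gt (num : Int) (row : List (Option Int)) :
    oGt num (leafvals row).2 = (pyGtO num (row.getD 1 none) && pyFalsy (row.getD 2 none)) := by
  simp only [leafvals]
  by_cases h : pyFalsy (row.getD 2 none) = true
  · rw [if_pos h, h, Bool.and_true]
    cases row.getD 1 none <;> rfl
  · have h' : pyFalsy (row.getD 2 none) = false := by simpa using h
    rw [if_neg h, h', Bool.and_false]
    rfl

-- A's scan = linear first-fit search over leaf summaries
theorem aFind_lsearch (num : Int) :
    ∀ (d : Nat) (sword : List (List (Option Int))) (i : Nat), sword.length - i ≤ d →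
      aFind num sword i =
        match lsearch num ((sword.drop i).map leafvals) i with
        | none => (sword, false)
        | some (j, true) => (sword.set j ((sword.getD j []).set 0 (some num)), true)
        | some (j, false) => (sword.set j ((sword.getD j []).set 2 (some num)), true) := by
  intro d
  induction d with
  | zero =>
    intro sword i hd
    have hge : sword.length ≤ i := by omega
    rw [aFind, dif_neg (by omega), List.drop_eq_nil_of_le hge]
    simp [lsearch]
  | succ d ih =>
    intro sword i hd
    by_cases hi : i < sword.length
    · have hdrop : sword.drop i = sword[i] :: sword.drop (i + 1) := List.drop_eq_getElem_cons hi
      have hgd : sword.getD i [] = sword[i] := List.getD_eq_getElem sword [] hi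
      have hgd' : sword[i]?.getD [] = sword[i] := by rw [List.getElem?_eq_getElem hi]; rfl
      rw [aFind, dif_pos hi, hdrop]
      simp only [List.map_cons, lsearch, leafvals_lt, leafvals_gt, hgd]
      split_ifs with h1 h2
      · simp [hgd']
      · simp [hgd']
      · rw [ih sword (i + 1) (by omega)]
    · have hge : sword.length ≤ i := by omega
      rw [aFind, dif_neg (by omega), List.drop_eq_nil_of_le hge]
      simp [lsearch]

-- the invariant tying B's tree to A's row list
def BInv (rows : List (List (Option Int))) (t : STree) (size : Nat) : Prop :=
  SizedT t size ∧ ValidT t ∧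
  leavesT t = rows.map leafvals ++ List.replicate (size - rows.length) (none, none) ∧
  rows.length ≤ size

theorem fold_agree (size : Nat) :
    ∀ (nums : List Int) (rows : List (List (Option Int))) (t : STree),
      BInv rows t size → rows.length + nums.length ≤ size →
      nums.foldl (fun sword num =>
          let r := aFind num sword 0
          if r.2 then r.1 else sword ++ [[none, some num, none]]) rows
        = (nums.foldl (bStep size) (rows, t)).1 := by
  intro nums
  induction nums with
  | nil => intro rows t _ _; rfl
  | cons num rest ih =>
    intro rows t hinv hcap
    obtain ⟨hsz, hvd, hlv, hle⟩ := hinv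
    have hquery : queryT t num 0 size = lsearch num (rows.map leafvals) 0 := by
      rw [query_eq_lsearch num t size 0 hvd hsz, hlv, lsearch_append]
      rw [lsearch_replicate]
      cases lsearch num (rows.map leafvals) 0 <;> rfl
    have hfind := aFind_lsearch num rows.length rows 0 (by omega)
    simp only [List.drop_zero] at hfind
    rw [List.foldl_cons, List.foldl_cons]
    rcases hq : lsearch num (rows.map leafvals) 0 with _ | ⟨j, b⟩
    · -- append a new row
      rw [hq] at hfind
      have hroom : rows.length < size := by simp at hcap; omega
      obtain ⟨hs1, hs2, hs3⟩ := setT_spec (some num, some num) t size 0 rows.length hsz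
        (by omega) (by omega)
      simp only [hfind, bStep, hquery, hq]
      apply ih
      · refine ⟨hs2, hs3 hvd, ?_, by simp; omega⟩
        rw [hs1, hlv]
        have hrep : List.replicate (size - rows.length) ((none : Option Int), (none : Option Int))
            = (none, none) :: List.replicate (size - rows.length - 1) (none, none) := by
          rw [← List.replicate_succ]
          congr 1; omega
        rw [hrep]
        have hml : (rows.map leafvals).length = rows.length := by simp
        rw [Nat.sub_zero, ← hml, set_append_seam]
        simp [leafvals, pyFalsy]
        omega
      · simp at hcap ⊢; omega
    · -- fill a slot of row j
      have hjr := lsearch_range num (rows.map leafvals) 0 j b hq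
      have hj : j < rows.length := by simp at hjr; omega
      rw [hq] at hfind
      have hrow' : ∀ (idx : Nat),
          (rows.map leafvals).set j (leafvals ((rows.getD j []).set idx (some num)))
            = (rows.set j ((rows.getD j []).set idx (some num))).map leafvals := by
        intro idx
        rw [List.map_set]
      obtain ⟨hs1, hs2, hs3⟩ := setT_spec
        (leafvals ((rows.getD j []).set (if b then 0 else 2) (some num))) t size 0 j hsz
        (by omega) (by omega)
      have hinv' : BInv (rows.set j ((rows.getD j []).set (if b then 0 else 2) (some num)))
          (setT t j (leafvals ((rows.getD j []).set (if b then 0 else 2) (some num))) 0 size) size := by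
        refine ⟨hs2, hs3 hvd, ?_, by simpa using hle⟩
        rw [hs1, hlv, Nat.sub_zero]
        rw [set_append_left _ _ _ _ (by simpa using hj)]
        rw [hrow' (if b then 0 else 2)]
        simp
      cases b with
      | true =>
        simp only [hfind, bStep, hquery, hq, if_pos]
        rw [ih _ _ (by simpa using hinv') (by simp at hcap ⊢; omega)]
        rfl
      | false =>
        simp only [hfind, bStep, hquery, hq]
        rw [ih _ _ (by simpa using hinv') (by simp at hcap ⊢; omega)]
        rfl

-- ===== VERDICT (by name: the statement is the Claim_ definition above) =====
theorem build_sword_spec : Claim_equal_build_sword := by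
  intro nums _
  unfold Spec_build_sword build_sword build_sword_alt
  obtain ⟨k, hk⟩ := grow_pow2 1 nums.length ⟨0, rfl⟩
  have hge := grow_ge 1 nums.length (by omega)
  rw [fold_agree (grow 1 nums.length) nums [] (vacant (grow 1 nums.length)) ?_ (by simpa using hge)]
  · rw [hk]
    refine ⟨vacant_sized k, vacant_valid _, ?_, by simp⟩
    simp [vacant_leaves k]
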